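-- pv_equiv track=rewrite | github.com/SylvainDe/aoc | python/2025/day8.py | get_last_junction
-- ===== SOURCE A (Python) =====
-- import itertools
--
-- def dist_squared(b1, b2):
--     deltas = (c1 - c2 for c1, c2 in zip(b1, b2))
--     return sum(d*d for d in deltas)
--
-- def get_circuit_with_box(circuits, box):
--     ret = None
--     for c in circuits:
--         if box in c:
--             assert ret is None
--             ret = c
--     assert ret is not None
--     return ret
--
-- def get_last_junction(boxes):
--    circuits = [set([b]) for b in boxes]
--    pairs = sorted(list(itertools.combinations(boxes, 2)), key=lambda boxes: dist_squared(*boxes))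
--    for (b1, b2) in pairs:
--        b1_circuit = get_circuit_with_box(circuits, b1)
--        b2_circuit = get_circuit_with_box(circuits, b2)
--        if b1_circuit != b2_circuit:
--            circuits.remove(b1_circuit)
--            b2_circuit.update(b1_circuit)
--            if len(circuits) == 1:
--                return b1[0] * b2[0]
-- ===== SOURCE B (Python) =====
-- import itertools
--
--
-- def dist_squared(b1, b2):
--     deltas = (c1 - c2 for c1, c2 in zip(b1, b2))
--     return sum(d*d for d in deltas)
--
--
-- def connected(vertices, edges):
--     # reachability fixpoint from vertices[0] over the undirected edge list
--     reach = {vertices[0]}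
--     for _ in range(len(vertices)):
--         new = set(reach)
--         for (a, b) in edges:
--             if a in new:
--                 new.add(b)
--             if b in new:
--                 new.add(a)
--         if new == reach:
--             break
--         reach = new
--     return all(v in reach for v in vertices)
--
--
-- def get_last_junction(boxes):
--     # The last junction is the first edge (in sorted order) whose prefix
--     # connects all boxes; binary-search that prefix length.
--     if len(boxes) < 2:
--         return None
--     pairs = sorted(itertools.combinations(boxes, 2), key=lambda p: dist_squared(*p))
--     if not connected(boxes, pairs):
--         return None
--     lo, hi = 1, len(pairs)
--     while lo < hi:
--         mid = (lo + hi) // 2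
--         if connected(boxes, pairs[:mid]):
--             hi = mid
--         else:
--             lo = mid + 1
--     b1, b2 = pairs[lo - 1]
--     return b1[0] * b2[0]
-- ===== Notes on version B (the rewrite author's own statement) =====
-- stated objective: alternative
-- what changed: Replaces A's incremental circuit merging (Kruskal-style list of sets scanned per pair) by a global characterisation: the answer edge is the first sorted pair whose prefix makes the box graph connected, found by binary search over the prefix length with a reachability-fixpoint connectivity check; no component structure is ever maintained.
-- outside the precondition, e.g. on get_last_junction([(1,), (), (1, 5)]): A returns 1, B returns 1; on get_last_junction([(0,), ()]): A raises IndexError, B raises IndexError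
import Mathlib
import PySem

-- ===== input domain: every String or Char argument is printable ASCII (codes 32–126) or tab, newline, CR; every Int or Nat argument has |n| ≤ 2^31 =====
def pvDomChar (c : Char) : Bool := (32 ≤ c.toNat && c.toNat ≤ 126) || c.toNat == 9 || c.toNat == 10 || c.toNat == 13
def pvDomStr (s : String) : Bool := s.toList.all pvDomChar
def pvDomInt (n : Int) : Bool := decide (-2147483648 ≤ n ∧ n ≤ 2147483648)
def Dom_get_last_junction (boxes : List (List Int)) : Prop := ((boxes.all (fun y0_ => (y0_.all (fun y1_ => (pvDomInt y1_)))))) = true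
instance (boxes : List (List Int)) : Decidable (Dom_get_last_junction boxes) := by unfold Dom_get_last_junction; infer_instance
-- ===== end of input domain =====

-- B drops A's incremental circuit merging entirely: the answer edge is the first sorted pair
-- whose prefix connects all boxes, found by binary search with a reachability-fixpoint check
-- (objective: alternative, no speed claim).

-- ===== PORT A =====
-- shared helper: dist_squared(b1, b2)
def distSq (b1 b2 : List Int) : Int :=
  ((b1.zip b2).map (fun p => (p.1 - p.2) * (p.1 - p.2))).sum

-- shared helper: sorted(itertools.combinations(boxes, 2), key=lambda p: dist_squared(*p))
-- (both Pythons contain this exact line; combination elements are 2-element lists here)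
def pairsSorted (boxes : List (List Int)) : List (List (List Int)) :=
  PySem.List.sorted (PySem.List.combinations boxes 2)
    (fun c => distSq (PySem.List.pyGetD c 0 []) (PySem.List.pyGetD c 1 [])) false

-- shared helper: return b1[0] * b2[0]  (none = IndexError, excluded by Pre_)
def prodFirsts (b1 b2 : List Int) : Option Int :=
  match PySem.List.pyGet? b1 0, PySem.List.pyGet? b2 0 with
  | some x, some y => some (x * y)
  | _, _ => none

-- get_circuit_with_box: scan circuits, assert at most / at least one contains box (none = AssertionError)
def gcwbGo (box : List Int) : List (PySem.Set (List Int)) → Option (PySem.Set (List Int)) → Option (PySem.Set (List Int))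
  | [], ret => ret
  | c :: cs, ret =>
    if PySem.Set.contains c box then
      match ret with
      | some _ => none            -- assert ret is None fails
      | none => gcwbGo box cs (some c)
    else gcwbGo box cs ret

def gcwb (circuits : List (PySem.Set (List Int))) (box : List Int) : Option (PySem.Set (List Int)) :=
  gcwbGo box circuits none

-- circuits.remove(b1_circuit): remove the FIRST element set-equal (Python's ==) to the target
def removeSetEq : List (PySem.Set (List Int)) → PySem.Set (List Int) → Option (List (PySem.Set (List Int)))
  | [], _ => none
  | c :: cs, t => if PySem.Set.equal c t then some cs else (removeSetEq cs t).map (c :: ·)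

-- main loop of A over the sorted pairs, carrying the list of circuits
-- (b2_circuit.update(b1_circuit) mutates the object inside the list: modelled by mapping over the
--  list; under Pre_ circuits are disjoint and nonempty, so exactly one element is set-equal to it)
def loopA : List (List (List Int)) → List (PySem.Set (List Int)) → Option Int
  | [], _ => none
  | p :: ps, circuits =>
    match p with
    | [b1, b2] =>
      match gcwb circuits b1, gcwb circuits b2 with
      | some c1, some c2 =>
        if PySem.Set.equal c1 c2 then loopA ps circuits
        else
          match removeSetEq circuits c1 with
          | none => none
          | some circuits' =>
            let circuits'' := circuits'.map fun c => if PySem.Set.equal c c2 then PySem.Set.update c c1 else c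
            if circuits''.length = 1 then prodFirsts b1 b2 else loopA ps circuits''
      | _, _ => none
    | _ => none

def get_last_junction (boxes : List (List Int)) : Option Int :=
  loopA (pairsSorted boxes) (boxes.map fun b => PySem.Set.ofList [b])

-- ===== PORT B =====
-- one pass of the propagation loop body: for (a, b) in edges: if a in new: new.add(b); if b in new: new.add(a)
-- (edge elements are 2-element lists; the tuple destructuring is ported as indexing with a dummy default)
def oneRound (edges : List (List (List Int))) (r : PySem.Set (List Int)) : PySem.Set (List Int) :=
  edges.foldl (fun r p =>
    let a := PySem.List.pyGetD p 0 []
    let b := PySem.List.pyGetD p 1 []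
    let r1 := if PySem.Set.contains r a then PySem.Set.add r b else r
    if PySem.Set.contains r1 b then PySem.Set.add r1 a else r1) r

-- for _ in range(len(vertices)): new = one pass; if new == reach: break; reach = new
def iterRounds (edges : List (List (List Int))) : Nat → PySem.Set (List Int) → PySem.Set (List Int)
  | 0, r => r
  | n + 1, r =>
    let new := oneRound edges r
    if PySem.Set.equal new r then r else iterRounds edges n new

-- connected(vertices, edges); vertices[0] would raise on [], but B only calls it with len >= 2
def connectedB (vertices : List (List Int)) (edges : List (List (List Int))) : Bool :=
  match PySem.List.pyGet? vertices 0 with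
  | none => false
  | some v0 =>
    let reach := iterRounds edges vertices.length (PySem.Set.ofList [v0])
    vertices.all (fun v => PySem.Set.contains reach v)

-- while lo < hi: mid = (lo + hi) // 2; if connected(boxes, pairs[:mid]): hi = mid else lo = mid + 1
def bsLoop (vertices : List (List Int)) (pairs : List (List (List Int))) (lo hi : Nat) : Nat :=
  if lo < hi then
    let mid := (lo + hi) / 2
    if connectedB vertices (PySem.List.slice pairs none (some (mid : Int))) then
      bsLoop vertices pairs lo mid
    else
      bsLoop vertices pairs (mid + 1) hi
  else lo
termination_by hi - lo
decreasing_by all_goals omega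

def get_last_junction_alt (boxes : List (List Int)) : Option Int :=
  if boxes.length < 2 then none
  else
    let pairs := pairsSorted boxes
    if !connectedB boxes pairs then none
    else
      let lo := bsLoop boxes pairs 1 pairs.length
      match PySem.List.pyGet? pairs ((lo : Int) - 1) with   -- b1, b2 = pairs[lo - 1]
      | none => none
      | some p => prodFirsts (PySem.List.pyGetD p 0 []) (PySem.List.pyGetD p 1 [])

-- ===== PRECONDITION & SPEC =====
-- Pre_ excludes lists with a repeated box (A's uniqueness assertion in get_circuit_with_box raises
-- AssertionError) and lists of two or more boxes containing the empty box (the merge that closes the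
-- circuit then usually indexes into the empty box and raises IndexError in both A and B; which inputs
-- escape that depends on the zero-distance tie order of the sort, so all are excluded).
def Pre_get_last_junction (boxes : List (List Int)) : Prop :=
  boxes.Nodup ∧ (([] : List Int) ∈ boxes → boxes.length ≤ 1)
instance (boxes : List (List Int)) : Decidable (Pre_get_last_junction boxes) := by
  unfold Pre_get_last_junction; infer_instance

def pvWitness_get_last_junction : List (List Int) := [[0, 0], [1, 1], [5, 5]]

def Spec_get_last_junction (boxes : List (List Int)) (out : Option Int) : Prop := out = get_last_junction_alt boxes
instance (boxes : List (List Int)) (out : Option Int) : Decidable (Spec_get_last_junction boxes out) := by unfold Spec_get_last_junction; infer_instance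

-- ===== CLAIM (what is proved, stated in full; the proofs are below) =====
def Claim_equal_get_last_junction : Prop := ∀ (boxes : List (List Int)), Dom_get_last_junction boxes → Pre_get_last_junction boxes → Spec_get_last_junction boxes (get_last_junction boxes)

-- ===== LEMMAS AND PROOFS =====

-- the undirected graph on the boxes whose edges are the processed pairs
def EdgeR (E : List (List (List Int))) (x y : List Int) : Prop := [x, y] ∈ E ∨ [y, x] ∈ E

def ConnR (E : List (List (List Int))) : List Int → List Int → Prop :=
  Relation.ReflTransGen (EdgeR E)

-- every edge is a 2-list with both endpoints among the boxes
def GoodE (boxes : List (List Int)) (E : List (List (List Int))) : Prop :=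
  ∀ p ∈ E, ∃ a b, p = [a, b] ∧ a ∈ boxes ∧ b ∈ boxes

def AllConn (v0 : List Int) (boxes : List (List Int)) (E : List (List (List Int))) : Prop :=
  ∀ x ∈ boxes, ConnR E v0 x

-- A's circuits are exactly the connectivity classes of the processed prefix
def AInv (boxes : List (List Int)) (E : List (List (List Int)))
    (circuits : List (PySem.Set (List Int))) : Prop :=
  (∀ c ∈ circuits, ∃ x, x ∈ c) ∧
  List.Pairwise (fun c d => ∀ x, x ∈ c → x ∉ d) circuits ∧
  (∀ c ∈ circuits, ∀ x ∈ c, x ∈ boxes) ∧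
  (∀ b ∈ boxes, ∃ c ∈ circuits, b ∈ c) ∧
  (∀ x y, x ∈ boxes → y ∈ boxes → ((∃ c ∈ circuits, x ∈ c ∧ y ∈ c) ↔ ConnR E x y))

-- ----- graph facts -----

theorem edgeR_symm (E : List (List (List Int))) : Symmetric (EdgeR E) := by
  intro x y h; exact h.symm

theorem connR_symm (E : List (List (List Int))) {x y : List Int} (h : ConnR E x y) : ConnR E y x :=
  Relation.ReflTransGen.symmetric (edgeR_symm E) h

theorem connR_mono {E E' : List (List (List Int))} (hsub : ∀ p ∈ E, p ∈ E') {x y : List Int}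
    (h : ConnR E x y) : ConnR E' x y := by
  refine Relation.ReflTransGen.mono ?_ h
  intro a b hab
  rcases hab with h | h
  · exact Or.inl (hsub _ h)
  · exact Or.inr (hsub _ h)

theorem connR_nil {x y : List Int} (h : ConnR [] x y) : x = y := by
  induction h with
  | refl => rfl
  | tail _ hstep _ => rcases hstep with h | h <;> simp at h

theorem connR_add_edge (E : List (List (List Int))) (b1 b2 x y : List Int) :
    ConnR (E ++ [[b1, b2]]) x y ↔
      ConnR E x y ∨ (ConnR E x b1 ∧ ConnR E b2 y) ∨ (ConnR E x b2 ∧ ConnR E b1 y) := by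
  constructor
  · intro h
    induction h with
    | refl => exact Or.inl Relation.ReflTransGen.refl
    | tail hcon hstep ih =>
      rename_i c d
      have hstep' : EdgeR E c d ∨ (c = b1 ∧ d = b2) ∨ (c = b2 ∧ d = b1) := by
        rcases hstep with hs | hs <;> rw [List.mem_append] at hs <;>
          rcases hs with hs | hs
        · exact Or.inl (Or.inl hs)
        · simp only [List.mem_singleton] at hs
          injection hs with h1 h2; injection h2 with h2 _
          exact Or.inr (Or.inl ⟨h1, h2⟩)
        · exact Or.inl (Or.inr hs)
        · simp only [List.mem_singleton] at hs
          injection hs with h1 h2; injection h2 with h2 _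
          exact Or.inr (Or.inr ⟨h2, h1⟩)
      rcases hstep' with hs | ⟨rfl, rfl⟩ | ⟨rfl, rfl⟩
      · rcases ih with ih | ⟨ih1, ih2⟩ | ⟨ih1, ih2⟩
        · exact Or.inl (ih.tail hs)
        · exact Or.inr (Or.inl ⟨ih1, ih2.tail hs⟩)
        · exact Or.inr (Or.inr ⟨ih1, ih2.tail hs⟩)
      · rcases ih with ih | ⟨ih1, ih2⟩ | ⟨ih1, ih2⟩
        · exact Or.inr (Or.inl ⟨ih, Relation.ReflTransGen.refl⟩)
        · exact Or.inr (Or.inl ⟨ih1, Relation.ReflTransGen.refl⟩)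
        · exact Or.inl ih1
      · rcases ih with ih | ⟨ih1, ih2⟩ | ⟨ih1, ih2⟩
        · exact Or.inr (Or.inr ⟨ih, Relation.ReflTransGen.refl⟩)
        · exact Or.inl ih1
        · exact Or.inr (Or.inr ⟨ih1, Relation.ReflTransGen.refl⟩)
  · have hsub : ∀ p ∈ E, p ∈ E ++ [[b1, b2]] := fun p hp => List.mem_append_left _ hp
    have hedge : ConnR (E ++ [[b1, b2]]) b1 b2 :=
      Relation.ReflTransGen.single (Or.inl (List.mem_append_right _ (by simp)))
    rintro (h | ⟨h1, h2⟩ | ⟨h1, h2⟩)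
    · exact connR_mono hsub h
    · exact ((connR_mono hsub h1).trans hedge).trans (connR_mono hsub h2)
    · exact ((connR_mono hsub h1).trans (connR_symm _ hedge)).trans (connR_mono hsub h2)
theorem setEqual_self (c : PySem.Set (List Int)) : PySem.Set.equal c c = true := by
  rw [PySem.Set.equal_iff]; exact fun _ => Iff.rfl

theorem disj_forall (l : List (PySem.Set (List Int)))
    (h : List.Pairwise (fun c d => ∀ x, x ∈ c → x ∉ d) l) :
    ∀ c ∈ l, ∀ d ∈ l, c ≠ d → ∀ x, x ∈ c → x ∉ d := by
  intro c hc d hd hne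
  exact List.Pairwise.forall (fun a b hab x hx hxd => hab x hxd hx) h hc hd hne

theorem circuits_nodup (l : List (PySem.Set (List Int))) (hne : ∀ c ∈ l, ∃ x, x ∈ c)
    (h : List.Pairwise (fun c d => ∀ x, x ∈ c → x ∉ d) l) : l.Nodup := by
  refine h.imp_of_mem ?_
  intro a b ha _ hab
  obtain ⟨x, hx⟩ := hne a ha
  intro he; exact hab x hx (he ▸ hx)

theorem gcwbGo_of_forall_not (box : List Int) :
    ∀ (cs : List (PySem.Set (List Int))) ret, (∀ d ∈ cs, box ∉ d) → gcwbGo box cs ret = ret := by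
  intro cs
  induction cs with
  | nil => intro ret _; rfl
  | cons c cs ih =>
    intro ret h
    have hc : PySem.Set.contains c box = false := by
      rw [← Bool.not_eq_true, PySem.Set.contains_iff]; exact h c (by simp)
    simp only [gcwbGo, hc, Bool.false_eq_true, if_false]
    exact ih ret (fun d hd => h d (by simp [hd]))

theorem gcwb_eq_some (box : List Int) (c : PySem.Set (List Int)) :
    ∀ (cs : List (PySem.Set (List Int))), cs.Nodup → c ∈ cs → box ∈ c →
      (∀ d ∈ cs, box ∈ d → d = c) → gcwb cs box = some c := by
  intro cs
  induction cs with
  | nil => intro _ h; simp at h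
  | cons c' cs ih =>
    intro hnd hmem hbox huniq
    by_cases hcc : c' = c
    · subst hcc
      have hcont : PySem.Set.contains c' box = true := PySem.Set.contains_iff c' box |>.mpr hbox
      show gcwbGo box (c' :: cs) none = some c'
      simp only [gcwbGo, hcont, if_true]
      apply gcwbGo_of_forall_not
      intro d hd hboxd
      have : d = c' := huniq d (by simp [hd]) hboxd
      subst this
      exact (List.nodup_cons.mp hnd).1 hd
    · have hcont : PySem.Set.contains c' box = false := by
        rw [← Bool.not_eq_true, PySem.Set.contains_iff]
        intro hb
        exact hcc (huniq c' (by simp) hb)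
      show gcwbGo box (c' :: cs) none = some c
      simp only [gcwbGo, hcont, Bool.false_eq_true, if_false]
      have hmem' : c ∈ cs := by rcases List.mem_cons.mp hmem with h | h; exact absurd h.symm hcc; exact h
      exact ih (List.nodup_cons.mp hnd).2 hmem' hbox (fun d hd hb => huniq d (by simp [hd]) hb)

theorem removeSetEq_eq_erase (c : PySem.Set (List Int)) :
    ∀ (cs : List (PySem.Set (List Int))), c ∈ cs →
      (∀ d ∈ cs, PySem.Set.equal d c = true → d = c) →
      removeSetEq cs c = some (cs.erase c) := by
  intro cs
  induction cs with
  | nil => intro h; simp at h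
  | cons c' cs ih =>
    intro hmem huniq
    by_cases he : PySem.Set.equal c' c = true
    · have : c' = c := huniq c' (by simp) he
      subst this
      simp [removeSetEq, he, List.erase_cons_head]
    · have hne : c' ≠ c := fun h => he (h ▸ setEqual_self c)
      have hmem' : c ∈ cs := by rcases List.mem_cons.mp hmem with h | h; exact absurd h.symm hne; exact h
      rw [removeSetEq]
      simp only [he, Bool.false_eq_true, if_false]
      rw [ih hmem' (fun d hd => huniq d (by simp [hd]))]
      rw [List.erase_cons_tail (by simpa using hne)]
      rfl

-- ----- invariant: initialisation, skip step, merge step -----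

theorem allconn_mono (v0 : List Int) (boxes : List (List Int))
    {E E' : List (List (List Int))} (hsub : ∀ p ∈ E, p ∈ E')
    (h : AllConn v0 boxes E) : AllConn v0 boxes E' :=
  fun x hx => connR_mono hsub (h x hx)

theorem ainv_init (boxes : List (List Int)) (hnd : boxes.Nodup) :
    AInv boxes [] (boxes.map fun b => PySem.Set.ofList [b]) := by
  have hsing : ∀ b : List Int, PySem.Set.ofList [b] = [b] := fun _ => rfl
  refine ⟨?_, ?_, ?_, ?_, ?_⟩
  · intro c hc
    obtain ⟨b, _, rfl⟩ := List.mem_map.mp hc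
    exact ⟨b, by rw [hsing]; simp⟩
  · rw [List.pairwise_map]
    refine hnd.imp_of_mem ?_
    intro a b _ _ hne x hx
    rw [hsing] at hx ⊢
    simp only [List.mem_singleton] at hx ⊢
    rw [hx]; exact hne
  · intro c hc x hx
    obtain ⟨b, hb, rfl⟩ := List.mem_map.mp hc
    rw [hsing] at hx
    simp only [List.mem_singleton] at hx
    rw [hx]; exact hb
  · intro b hb
    exact ⟨_, List.mem_map_of_mem hb, by rw [hsing]; simp⟩
  · intro x y hx hy
    constructor
    · rintro ⟨c, hc, hxc, hyc⟩
      obtain ⟨b, _, rfl⟩ := List.mem_map.mp hc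
      rw [hsing] at hxc hyc
      simp only [List.mem_singleton] at hxc hyc
      rw [hxc, hyc]
      exact Relation.ReflTransGen.refl
    · intro h
      have := connR_nil h
      subst this
      exact ⟨_, List.mem_map_of_mem hx, by rw [hsing]; simp⟩
theorem ainv_skip (boxes : List (List Int)) (E : List (List (List Int)))
    (circuits : List (PySem.Set (List Int))) (hinv : AInv boxes E circuits)
    (b1 b2 : List Int) (hb1 : b1 ∈ boxes) (hb2 : b2 ∈ boxes)
    (hconn : ConnR E b1 b2) :
    AInv boxes (E ++ [[b1, b2]]) circuits := by
  obtain ⟨h1, h2, h3, h4, h5⟩ := hinv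
  refine ⟨h1, h2, h3, h4, ?_⟩
  intro x y hx hy
  rw [connR_add_edge]
  constructor
  · intro hS
    exact Or.inl ((h5 x y hx hy).mp hS)
  · rintro (h | ⟨ha, hb⟩ | ⟨ha, hb⟩)
    · exact (h5 x y hx hy).mpr h
    · exact (h5 x y hx hy).mpr (ha.trans (hconn.trans hb))
    · exact (h5 x y hx hy).mpr (ha.trans ((connR_symm E hconn).trans hb))
theorem ainv_step (boxes : List (List Int)) (E : List (List (List Int)))
    (circuits : List (PySem.Set (List Int))) (hinv : AInv boxes E circuits)
    (b1 b2 : List Int) (hb1 : b1 ∈ boxes) (hb2 : b2 ∈ boxes)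
    (c1 c2 : PySem.Set (List Int)) (hc1 : c1 ∈ circuits) (hc2 : c2 ∈ circuits)
    (hb1c1 : b1 ∈ c1) (hb2c2 : b2 ∈ c2) (hne : c1 ≠ c2) :
    AInv boxes (E ++ [[b1, b2]]) ((circuits.erase c1).map fun c =>
        if PySem.Set.equal c c2 then PySem.Set.update c c1 else c) := by
  obtain ⟨hne0, hpw, hsubs, hcov, hiff⟩ := hinv
  have hcnd : circuits.Nodup := circuits_nodup circuits hne0 hpw
  have hdisj := disj_forall circuits hpw
  have huniq : ∀ b (c d : PySem.Set (List Int)), c ∈ circuits → d ∈ circuits →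
      b ∈ c → b ∈ d → c = d := by
    intro b c d hc hd hbc hbd
    by_contra h
    exact hdisj c hc d hd h b hbc hbd
  have hmemE : ∀ c : PySem.Set (List Int), c ∈ circuits.erase c1 ↔ c ≠ c1 ∧ c ∈ circuits :=
    fun c => List.Nodup.mem_erase_iff hcnd
  have hc2E : c2 ∈ circuits.erase c1 := (hmemE c2).mpr ⟨Ne.symm hne, hc2⟩
  have hfc : ∀ c ∈ circuits.erase c1,
      (if PySem.Set.equal c c2 then PySem.Set.update c c1 else c)
        = if c = c2 then PySem.Set.update c2 c1 else c := by
    intro c hcE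
    by_cases h : c = c2
    · subst h; rw [if_pos (setEqual_self c), if_pos rfl]
    · have hEq : PySem.Set.equal c c2 = false := by
        rw [← Bool.not_eq_true, PySem.Set.equal_iff]
        intro hsame
        exact h (huniq b2 c c2 ((hmemE c).mp hcE).2 hc2 ((hsame b2).mpr hb2c2) hb2c2)
      rw [hEq, if_neg h]
      simp
  have hmemM : ∀ x, x ∈ PySem.Set.update c2 c1 ↔ x ∈ c2 ∨ x ∈ c1 :=
    fun x => PySem.Set.mem_update c2 c1 x
  have mz1 : ∀ z, z ∈ boxes → (z ∈ c1 ↔ ConnR E z b1) := by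
    intro z hz
    constructor
    · intro h; exact (hiff z b1 hz hb1).mp ⟨c1, hc1, h, hb1c1⟩
    · intro h
      obtain ⟨c, hc, hzc, hb1c⟩ := (hiff z b1 hz hb1).mpr h
      exact (huniq b1 c c1 hc hc1 hb1c hb1c1) ▸ hzc
  have mz2 : ∀ z, z ∈ boxes → (z ∈ c2 ↔ ConnR E z b2) := by
    intro z hz
    constructor
    · intro h; exact (hiff z b2 hz hb2).mp ⟨c2, hc2, h, hb2c2⟩
    · intro h
      obtain ⟨c, hc, hzc, hb2c⟩ := (hiff z b2 hz hb2).mpr h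
      exact (huniq b2 c c2 hc hc2 hb2c hb2c2) ▸ hzc
  refine ⟨?_, ?_, ?_, ?_, ?_⟩
  · -- nonempty
    intro cc hcc
    obtain ⟨c, hcE, rfl⟩ := List.mem_map.mp hcc
    rw [hfc c hcE]
    by_cases h : c = c2
    · rw [if_pos h]; exact ⟨b2, (hmemM b2).mpr (Or.inl hb2c2)⟩
    · rw [if_neg h]; exact hne0 c ((hmemE c).mp hcE).2
  · -- pairwise disjoint
    rw [List.pairwise_map]
    have hpwE : List.Pairwise (fun c d => ∀ x, x ∈ c → x ∉ d) (circuits.erase c1) :=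
      hpw.sublist (List.erase_sublist ..)
    refine hpwE.imp_of_mem ?_
    intro a b ha hb hab
    rw [hfc a ha, hfc b hb]
    by_cases ha2 : a = c2 <;> by_cases hb2' : b = c2
    · subst ha2; subst hb2'
      exact absurd (hab b2 hb2c2) (fun h => h hb2c2)
    · subst ha2
      rw [if_pos rfl, if_neg hb2']
      intro x hx
      rcases (hmemM x).mp hx with h | h
      · exact hab x h
      · exact hdisj c1 hc1 b ((hmemE b).mp hb).2 (Ne.symm ((hmemE b).mp hb).1) x h
    · subst hb2'
      rw [if_neg ha2, if_pos rfl]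
      intro x hx hxM
      rcases (hmemM x).mp hxM with h | h
      · exact hab x hx h
      · exact hdisj a ((hmemE a).mp ha).2 c1 hc1 ((hmemE a).mp ha).1 x hx h
    · rw [if_neg ha2, if_neg hb2']; exact hab
  · -- members are boxes
    intro cc hcc x hx
    obtain ⟨c, hcE, rfl⟩ := List.mem_map.mp hcc
    rw [hfc c hcE] at hx
    by_cases h : c = c2
    · rw [if_pos h] at hx
      rcases (hmemM x).mp hx with h' | h'
      · exact hsubs c2 hc2 x h'
      · exact hsubs c1 hc1 x h'
    · rw [if_neg h] at hx
      exact hsubs c ((hmemE c).mp hcE).2 x hx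
  · -- cover
    intro b hb
    obtain ⟨c, hc, hbc⟩ := hcov b hb
    by_cases h1 : c = c1
    · refine ⟨_, List.mem_map_of_mem hc2E, ?_⟩
      rw [hfc c2 hc2E, if_pos rfl]
      exact (hmemM b).mpr (Or.inr (h1 ▸ hbc))
    · by_cases h2 : c = c2
      · refine ⟨_, List.mem_map_of_mem hc2E, ?_⟩
        rw [hfc c2 hc2E, if_pos rfl]
        exact (hmemM b).mpr (Or.inl (h2 ▸ hbc))
      · have hcE : c ∈ circuits.erase c1 := (hmemE c).mpr ⟨h1, hc⟩
        refine ⟨_, List.mem_map_of_mem hcE, ?_⟩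
        rw [hfc c hcE, if_neg h2]
        exact hbc
  · -- classes are the connectivity classes of E ++ [[b1, b2]]
    intro x y hx hy
    rw [connR_add_edge]
    constructor
    · rintro ⟨cc, hcc, hxcc, hycc⟩
      obtain ⟨c, hcE, rfl⟩ := List.mem_map.mp hcc
      rw [hfc c hcE] at hxcc hycc
      by_cases hcc2 : c = c2
      · rw [if_pos hcc2] at hxcc hycc
        rcases (hmemM x).mp hxcc with hx2' | hx1' <;> rcases (hmemM y).mp hycc with hy2' | hy1'
        · exact Or.inl ((hiff x y hx hy).mp ⟨c2, hc2, hx2', hy2'⟩)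
        · exact Or.inr (Or.inr ⟨(mz2 x hx).mp hx2', connR_symm E ((mz1 y hy).mp hy1')⟩)
        · exact Or.inr (Or.inl ⟨(mz1 x hx).mp hx1', connR_symm E ((mz2 y hy).mp hy2')⟩)
        · exact Or.inl ((hiff x y hx hy).mp ⟨c1, hc1, hx1', hy1'⟩)
      · rw [if_neg hcc2] at hxcc hycc
        exact Or.inl ((hiff x y hx hy).mp ⟨c, ((hmemE c).mp hcE).2, hxcc, hycc⟩)
    · rintro (h | ⟨ha, hb⟩ | ⟨ha, hb⟩)
      · obtain ⟨c, hc, hxc, hyc⟩ := (hiff x y hx hy).mpr h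
        by_cases h1 : c = c1
        · subst h1
          refine ⟨_, List.mem_map_of_mem hc2E, ?_, ?_⟩ <;> rw [hfc c2 hc2E, if_pos rfl]
          · exact (hmemM x).mpr (Or.inr hxc)
          · exact (hmemM y).mpr (Or.inr hyc)
        · by_cases h2 : c = c2
          · subst h2
            refine ⟨_, List.mem_map_of_mem hc2E, ?_, ?_⟩ <;> rw [hfc c hc2E, if_pos rfl]
            · exact (hmemM x).mpr (Or.inl hxc)
            · exact (hmemM y).mpr (Or.inl hyc)
          · have hcE : c ∈ circuits.erase c1 := (hmemE c).mpr ⟨h1, hc⟩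
            refine ⟨_, List.mem_map_of_mem hcE, ?_, ?_⟩ <;> rw [hfc c hcE, if_neg h2]
            · exact hxc
            · exact hyc
      · refine ⟨_, List.mem_map_of_mem hc2E, ?_, ?_⟩ <;> rw [hfc c2 hc2E, if_pos rfl]
        · exact (hmemM x).mpr (Or.inr ((mz1 x hx).mpr ha))
        · exact (hmemM y).mpr (Or.inl ((mz2 y hy).mpr (connR_symm E hb)))
      · refine ⟨_, List.mem_map_of_mem hc2E, ?_, ?_⟩ <;> rw [hfc c2 hc2E, if_pos rfl]
        · exact (hmemM x).mpr (Or.inl ((mz2 x hx).mpr ha))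
        · exact (hmemM y).mpr (Or.inr ((mz1 y hy).mpr (connR_symm E hb)))
theorem not_allconn_of_two (boxes : List (List Int)) (E : List (List (List Int)))
    (circuits : List (PySem.Set (List Int))) (hinv : AInv boxes E circuits)
    (v0 : List Int) (hv0 : v0 ∈ boxes) (hlen : 2 ≤ circuits.length) :
    ¬ AllConn v0 boxes E := by
  obtain ⟨hne0, hpw, hsubs, hcov, hiff⟩ := hinv
  have hcnd : circuits.Nodup := circuits_nodup circuits hne0 hpw
  have hdisj := disj_forall circuits hpw
  have huniq : ∀ b (c d : PySem.Set (List Int)), c ∈ circuits → d ∈ circuits →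
      b ∈ c → b ∈ d → c = d := by
    intro b c d hc hd hbc hbd
    by_contra h
    exact hdisj c hc d hd h b hbc hbd
  intro hall
  obtain ⟨c, hc, hvc⟩ := hcov v0 hv0
  have hex : ∃ d ∈ circuits, d ≠ c := by
    match circuits, hlen, hcnd, hc with
    | a :: b :: t, _, hcnd, hc =>
      by_cases hac : a = c
      · refine ⟨b, by simp, ?_⟩
        intro hbc'
        exact (List.nodup_cons.mp hcnd).1 (by rw [hac, ← hbc']; simp)
      · exact ⟨a, by simp, hac⟩
  obtain ⟨d, hd, hdc⟩ := hex
  obtain ⟨z, hz⟩ := hne0 d hd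
  have hzb := hsubs d hd z hz
  obtain ⟨c', hc', hvc', hzc'⟩ := (hiff v0 z hv0 hzb).mpr (hall z hzb)
  have e1 : c' = c := huniq v0 c' c hc' hc hvc' hvc
  have e2 : c' = d := huniq z c' d hc' hd hzc' hz
  exact hdc (e2 ▸ e1 ▸ rfl : d = c)
theorem allconn_of_merge_two (boxes : List (List Int)) (E : List (List (List Int)))
    (circuits : List (PySem.Set (List Int))) (hinv : AInv boxes E circuits)
    (v0 : List Int) (hv0 : v0 ∈ boxes) (hlen : circuits.length = 2)
    (b1 b2 : List Int) (hb1 : b1 ∈ boxes) (hb2 : b2 ∈ boxes)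
    (c1 c2 : PySem.Set (List Int)) (hc1 : c1 ∈ circuits) (hc2 : c2 ∈ circuits)
    (hb1c1 : b1 ∈ c1) (hb2c2 : b2 ∈ c2) (hne : c1 ≠ c2) :
    AllConn v0 boxes (E ++ [[b1, b2]]) := by
  obtain ⟨hne0, hpw, hsubs, hcov, hiff⟩ := hinv
  have hmem2 : ∀ c ∈ circuits, c = c1 ∨ c = c2 := by
    match circuits, hlen, hc1, hc2 with
    | [a, b], _, hc1, hc2 =>
      intro c hc
      simp only [List.mem_cons, List.not_mem_nil, or_false] at hc hc1 hc2
      rcases hc1 with rfl | rfl <;> rcases hc2 with rfl | rfl <;> rcases hc with rfl | rfl <;>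
        first
        | exact absurd rfl hne
        | exact Or.inl rfl
        | exact Or.inr rfl
  intro x hx
  obtain ⟨cv, hcv, hvcv⟩ := hcov v0 hv0
  obtain ⟨cx, hcx, hxcx⟩ := hcov x hx
  rw [show ConnR (E ++ [[b1, b2]]) v0 x ↔ _ from connR_add_edge E b1 b2 v0 x]
  rcases hmem2 cv hcv with rfl | rfl <;> rcases hmem2 cx hcx with rfl | rfl
  · exact Or.inl ((hiff v0 x hv0 hx).mp ⟨cx, hcx, hvcv, hxcx⟩)
  · exact Or.inr (Or.inl ⟨(hiff v0 b1 hv0 hb1).mp ⟨cv, hcv, hvcv, hb1c1⟩,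
      (hiff b2 x hb2 hx).mp ⟨cx, hcx, hb2c2, hxcx⟩⟩)
  · exact Or.inr (Or.inr ⟨(hiff v0 b2 hv0 hb2).mp ⟨cv, hcv, hvcv, hb2c2⟩,
      (hiff b1 x hb1 hx).mp ⟨cx, hcx, hb1c1, hxcx⟩⟩)
  · exact Or.inl ((hiff v0 x hv0 hx).mp ⟨cx, hcx, hvcv, hxcx⟩)
theorem loopA_none (boxes : List (List Int)) (v0 : List Int) (hv0 : v0 ∈ boxes) :
    ∀ (ps E : List (List (List Int))) (circuits : List (PySem.Set (List Int))),
      (∀ p ∈ ps, ∃ a b, p = [a, b] ∧ a ∈ boxes ∧ b ∈ boxes) →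
      AInv boxes E circuits → 2 ≤ circuits.length →
      ¬ AllConn v0 boxes (E ++ ps) →
      loopA ps circuits = none := by
  intro ps
  induction ps with
  | nil => intro E circuits _ _ _ _; rfl
  | cons p ps ih =>
    intro E circuits hshape hinv h2len hnc
    obtain ⟨b1, b2, rfl, hb1, hb2⟩ := hshape p (by simp)
    obtain ⟨hne0, hpw, hsubs, hcov, hiff⟩ := hinv
    have hinv' : AInv boxes E circuits := ⟨hne0, hpw, hsubs, hcov, hiff⟩
    have hcnd : circuits.Nodup := circuits_nodup circuits hne0 hpw
    have hdisj := disj_forall circuits hpw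
    have huniq : ∀ b (c d : PySem.Set (List Int)), c ∈ circuits → d ∈ circuits →
        b ∈ c → b ∈ d → c = d := by
      intro b c d hc hd hbc hbd
      by_contra h
      exact hdisj c hc d hd h b hbc hbd
    obtain ⟨c1, hc1, hb1c1⟩ := hcov b1 hb1
    obtain ⟨c2, hc2, hb2c2⟩ := hcov b2 hb2
    have hg1 : gcwb circuits b1 = some c1 :=
      gcwb_eq_some b1 c1 circuits hcnd hc1 hb1c1
        (fun d hd hbd => huniq b1 d c1 hd hc1 hbd hb1c1)
    have hg2 : gcwb circuits b2 = some c2 :=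
      gcwb_eq_some b2 c2 circuits hcnd hc2 hb2c2
        (fun d hd hbd => huniq b2 d c2 hd hc2 hbd hb2c2)
    have hEps : E ++ [b1, b2] :: ps = (E ++ [[b1, b2]]) ++ ps := by simp
    have hshape' : ∀ q ∈ ps, ∃ a b, q = [a, b] ∧ a ∈ boxes ∧ b ∈ boxes :=
      fun q hq => hshape q (by simp [hq])
    simp only [loopA, hg1, hg2]
    by_cases hceq : c1 = c2
    · rw [if_pos (hceq ▸ setEqual_self c1)]
      have hconn12 : ConnR E b1 b2 :=
        (hiff b1 b2 hb1 hb2).mp ⟨c1, hc1, hb1c1, hceq ▸ hb2c2⟩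
      exact ih (E ++ [[b1, b2]]) circuits hshape'
        (ainv_skip boxes E circuits hinv' b1 b2 hb1 hb2 hconn12) h2len (hEps ▸ hnc)
    · have hEq : PySem.Set.equal c1 c2 = false := by
        rw [← Bool.not_eq_true, PySem.Set.equal_iff]
        intro hsame
        exact hceq (huniq b1 c1 c2 hc1 hc2 hb1c1 ((hsame b1).mp hb1c1))
      have hrem : removeSetEq circuits c1 = some (circuits.erase c1) :=
        removeSetEq_eq_erase c1 circuits hc1
          (fun d hd hEqd => by
            rw [PySem.Set.equal_iff] at hEqd
            exact huniq b1 d c1 hd hc1 ((hEqd b1).mpr hb1c1) hb1c1)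
      rw [hEq]
      simp only [Bool.false_eq_true, if_false, hrem]
      have hlen'' : ((circuits.erase c1).map fun c =>
          if PySem.Set.equal c c2 then PySem.Set.update c c1 else c).length
          = circuits.length - 1 := by
        rw [List.length_map, List.length_erase_of_mem hc1]
      by_cases hone : ((circuits.erase c1).map fun c =>
          if PySem.Set.equal c c2 then PySem.Set.update c c1 else c).length = 1
      · exfalso
        have htwo : circuits.length = 2 := by omega
        have hall : AllConn v0 boxes (E ++ [[b1, b2]]) :=
          allconn_of_merge_two boxes E circuits hinv' v0 hv0 htwo b1 b2 hb1 hb2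
            c1 c2 hc1 hc2 hb1c1 hb2c2 hceq
        refine hnc ?_
        rw [hEps]
        exact allconn_mono v0 boxes (fun q hq => List.mem_append_left ps hq) hall
      · rw [if_neg hone]
        refine ih (E ++ [[b1, b2]]) _ hshape'
          (ainv_step boxes E circuits hinv' b1 b2 hb1 hb2 c1 c2 hc1 hc2 hb1c1 hb2c2 hceq)
          (by omega) (hEps ▸ hnc)
theorem loopA_found (boxes : List (List Int)) (v0 : List Int) (hv0 : v0 ∈ boxes) :
    ∀ (ps : List (List (List Int))) (E : List (List (List Int)))
      (circuits : List (PySem.Set (List Int))) (k : Nat),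
      (∀ p ∈ ps, ∃ a b, p = [a, b] ∧ a ∈ boxes ∧ b ∈ boxes) →
      AInv boxes E circuits → 2 ≤ circuits.length →
      AllConn v0 boxes (E ++ ps.take (k + 1)) →
      (∀ j ≤ k, ¬ AllConn v0 boxes (E ++ ps.take j)) →
      ∀ a b, ps[k]? = some [a, b] →
      loopA ps circuits = prodFirsts a b := by
  intro ps
  induction ps with
  | nil => intro E circuits k _ _ _ _ _ a b hab; simp at hab
  | cons p ps ih =>
    intro E circuits k hshape hinv h2len hallk hnotj a b hab
    obtain ⟨b1, b2, rfl, hb1, hb2⟩ := hshape p (by simp)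
    obtain ⟨hne0, hpw, hsubs, hcov, hiff⟩ := hinv
    have hinv' : AInv boxes E circuits := ⟨hne0, hpw, hsubs, hcov, hiff⟩
    have hcnd : circuits.Nodup := circuits_nodup circuits hne0 hpw
    have hdisj := disj_forall circuits hpw
    have huniq : ∀ b (c d : PySem.Set (List Int)), c ∈ circuits → d ∈ circuits →
        b ∈ c → b ∈ d → c = d := by
      intro b c d hc hd hbc hbd
      by_contra h
      exact hdisj c hc d hd h b hbc hbd
    obtain ⟨c1, hc1, hb1c1⟩ := hcov b1 hb1
    obtain ⟨c2, hc2, hb2c2⟩ := hcov b2 hb2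
    have hg1 : gcwb circuits b1 = some c1 :=
      gcwb_eq_some b1 c1 circuits hcnd hc1 hb1c1
        (fun d hd hbd => huniq b1 d c1 hd hc1 hbd hb1c1)
    have hg2 : gcwb circuits b2 = some c2 :=
      gcwb_eq_some b2 c2 circuits hcnd hc2 hb2c2
        (fun d hd hbd => huniq b2 d c2 hd hc2 hbd hb2c2)
    have hshape' : ∀ q ∈ ps, ∃ a b, q = [a, b] ∧ a ∈ boxes ∧ b ∈ boxes :=
      fun q hq => hshape q (by simp [hq])
    simp only [loopA, hg1, hg2]
    by_cases hceq : c1 = c2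
    · rw [if_pos (hceq ▸ setEqual_self c1)]
      have hconn12 : ConnR E b1 b2 :=
        (hiff b1 b2 hb1 hb2).mp ⟨c1, hc1, hb1c1, hceq ▸ hb2c2⟩
      have hinvS : AInv boxes (E ++ [[b1, b2]]) circuits :=
        ainv_skip boxes E circuits hinv' b1 b2 hb1 hb2 hconn12
      match k, hab with
      | 0, hab =>
        exfalso
        have h1 : AllConn v0 boxes (E ++ [[b1, b2]]) := by
          have := hallk
          rw [List.take_succ_cons, List.take_zero] at this
          exact this
        exact not_allconn_of_two boxes (E ++ [[b1, b2]]) circuits hinvS v0 hv0 h2len h1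
      | k' + 1, hab =>
        refine ih (E ++ [[b1, b2]]) circuits k' hshape' hinvS h2len ?_ ?_ a b ?_
        · rw [List.take_succ_cons] at hallk
          rw [show (E ++ [[b1, b2]]) ++ ps.take (k' + 1) = E ++ ([b1, b2] :: ps.take (k' + 1)) by
            simp]
          exact hallk
        · intro j hj
          have := hnotj (j + 1) (by omega)
          rw [List.take_succ_cons] at this
          rw [show (E ++ [[b1, b2]]) ++ ps.take j = E ++ ([b1, b2] :: ps.take j) by
            simp]
          exact this
        · simpa using hab
    · have hEq : PySem.Set.equal c1 c2 = false := by
        rw [← Bool.not_eq_true, PySem.Set.equal_iff]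
        intro hsame
        exact hceq (huniq b1 c1 c2 hc1 hc2 hb1c1 ((hsame b1).mp hb1c1))
      have hrem : removeSetEq circuits c1 = some (circuits.erase c1) :=
        removeSetEq_eq_erase c1 circuits hc1
          (fun d hd hEqd => by
            rw [PySem.Set.equal_iff] at hEqd
            exact huniq b1 d c1 hd hc1 ((hEqd b1).mpr hb1c1) hb1c1)
      rw [hEq]
      simp only [Bool.false_eq_true, if_false, hrem]
      have hlen'' : ((circuits.erase c1).map fun c =>
          if PySem.Set.equal c c2 then PySem.Set.update c c1 else c).length
          = circuits.length - 1 := by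
        rw [List.length_map, List.length_erase_of_mem hc1]
      by_cases hone : ((circuits.erase c1).map fun c =>
          if PySem.Set.equal c c2 then PySem.Set.update c c1 else c).length = 1
      · rw [if_pos hone]
        have htwo : circuits.length = 2 := by omega
        have hall1 : AllConn v0 boxes (E ++ [[b1, b2]]) :=
          allconn_of_merge_two boxes E circuits hinv' v0 hv0 htwo b1 b2 hb1 hb2
            c1 c2 hc1 hc2 hb1c1 hb2c2 hceq
        match k, hab with
        | 0, hab =>
          have : ([b1, b2] : List (List Int)) = [a, b] := by simpa using hab
          obtain ⟨rfl, rfl⟩ : b1 = a ∧ b2 = b := by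
            injection this with h1 h2
            injection h2 with h2 _
            exact ⟨h1, h2⟩
          rfl
        | k' + 1, hab =>
          exfalso
          have := hnotj 1 (by omega)
          rw [List.take_succ_cons, List.take_zero] at this
          exact this hall1
      · rw [if_neg hone]
        have hinvM : AInv boxes (E ++ [[b1, b2]]) ((circuits.erase c1).map fun c =>
            if PySem.Set.equal c c2 then PySem.Set.update c c1 else c) :=
          ainv_step boxes E circuits hinv' b1 b2 hb1 hb2 c1 c2 hc1 hc2 hb1c1 hb2c2 hceq
        match k, hab with
        | 0, hab =>
          exfalso
          have h1 : AllConn v0 boxes (E ++ [[b1, b2]]) := by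
            have := hallk
            rw [List.take_succ_cons, List.take_zero] at this
            exact this
          exact not_allconn_of_two boxes (E ++ [[b1, b2]]) _ hinvM v0 hv0 (by omega) h1
        | k' + 1, hab =>
          refine ih (E ++ [[b1, b2]]) _ k' hshape' hinvM (by omega) ?_ ?_ a b ?_
          · rw [List.take_succ_cons] at hallk
            rw [show (E ++ [[b1, b2]]) ++ ps.take (k' + 1) = E ++ ([b1, b2] :: ps.take (k' + 1)) by
              simp]
            exact hallk
          · intro j hj
            have := hnotj (j + 1) (by omega)
            rw [List.take_succ_cons] at this
            rw [show (E ++ [[b1, b2]]) ++ ps.take j = E ++ ([b1, b2] :: ps.take j) by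
              simp]
            exact this
          · simpa using hab
def ClosedR (E : List (List (List Int))) (r : PySem.Set (List Int)) : Prop :=
  ∀ p ∈ E, ∀ a b, p = [a, b] → (a ∈ r → b ∈ r) ∧ (b ∈ r → a ∈ r)

def stepR (r : PySem.Set (List Int)) (p : List (List Int)) : PySem.Set (List Int) :=
  let a := PySem.List.pyGetD p 0 []
  let b := PySem.List.pyGetD p 1 []
  let r1 := if PySem.Set.contains r a then PySem.Set.add r b else r
  if PySem.Set.contains r1 b then PySem.Set.add r1 a else r1

theorem oneRound_cons (p : List (List Int)) (E : List (List (List Int))) (r : PySem.Set (List Int)) :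
    oneRound (p :: E) r = oneRound E (stepR r p) := rfl

theorem stepR_mem (r : PySem.Set (List Int)) (p : List (List Int)) (x : List Int) (hx : x ∈ r) :
    x ∈ stepR r p := by
  unfold stepR; simp only []
  split_ifs <;> simp_all [PySem.Set.mem_add]

theorem stepR_sub (r : PySem.Set (List Int)) (a b : List Int) (x : List Int)
    (hx : x ∈ stepR r [a, b]) : x ∈ r ∨ (a ∈ r ∧ x = b) ∨ (b ∈ r ∧ x = a) := by
  unfold stepR at hx
  simp only [show PySem.List.pyGetD [a,b] 0 ([]:List Int) = a from rfl,
    show PySem.List.pyGetD [a,b] 1 ([]:List Int) = b from rfl] at hx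
  by_cases ha : a ∈ r
  · rw [if_pos ((PySem.Set.contains_iff r a).mpr ha)] at hx
    split_ifs at hx
    · simp only [PySem.Set.mem_add] at hx
      rcases hx with (hx | rfl) | rfl
      · exact Or.inl hx
      · exact Or.inr (Or.inl ⟨ha, rfl⟩)
      · exact Or.inl ha
    · simp only [PySem.Set.mem_add] at hx
      rcases hx with hx | rfl
      · exact Or.inl hx
      · exact Or.inr (Or.inl ⟨ha, rfl⟩)
  · rw [if_neg (fun h => ha ((PySem.Set.contains_iff r a).mp h))] at hx
    split_ifs at hx with hb
    · rw [PySem.Set.contains_iff] at hb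
      simp only [PySem.Set.mem_add] at hx
      rcases hx with hx | rfl
      · exact Or.inl hx
      · exact Or.inr (Or.inr ⟨hb, rfl⟩)
    · exact Or.inl hx

theorem stepR_edge1 (r : PySem.Set (List Int)) (a b : List Int) (ha : a ∈ r) :
    b ∈ stepR r [a, b] := by
  unfold stepR
  simp only [show PySem.List.pyGetD [a,b] 0 ([]:List Int) = a from rfl,
    show PySem.List.pyGetD [a,b] 1 ([]:List Int) = b from rfl]
  rw [if_pos ((PySem.Set.contains_iff r a).mpr ha)]
  split_ifs <;> simp [PySem.Set.mem_add]

theorem stepR_edge2 (r : PySem.Set (List Int)) (a b : List Int) (hb : b ∈ r) :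
    a ∈ stepR r [a, b] := by
  unfold stepR
  simp only [show PySem.List.pyGetD [a,b] 0 ([]:List Int) = a from rfl,
    show PySem.List.pyGetD [a,b] 1 ([]:List Int) = b from rfl]
  have hbr1 : b ∈ (if PySem.Set.contains r a then PySem.Set.add r b else r) := by
    split_ifs <;> simp [PySem.Set.mem_add, hb]
  rw [if_pos ((PySem.Set.contains_iff _ b).mpr hbr1)]
  simp [PySem.Set.mem_add]

theorem stepR_nodup (r : PySem.Set (List Int)) (p : List (List Int)) (h : r.Nodup) :
    (stepR r p).Nodup := by
  unfold stepR; simp only []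
  split_ifs <;> first
  | exact h
  | exact PySem.Set.nodup_add _ _ h
  | exact PySem.Set.nodup_add _ _ (PySem.Set.nodup_add _ _ h)

theorem oneRound_subset (E : List (List (List Int))) (r : PySem.Set (List Int)) :
    ∀ x ∈ r, x ∈ oneRound E r := by
  induction E generalizing r with
  | nil => intro x hx; exact hx
  | cons p E ih =>
    intro x hx
    rw [oneRound_cons]
    exact ih (stepR r p) x (stepR_mem r p x hx)

theorem oneRound_edge (E : List (List (List Int))) (r : PySem.Set (List Int))
    (a b : List Int) (hp : [a, b] ∈ E) :
    (a ∈ r → b ∈ oneRound E r) ∧ (b ∈ r → a ∈ oneRound E r) := by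
  induction E generalizing r with
  | nil => simp at hp
  | cons q E ih =>
    rw [oneRound_cons]
    rcases List.mem_cons.mp hp with h | h
    · subst h
      exact ⟨fun ha => oneRound_subset E _ b (stepR_edge1 r a b ha),
             fun hb => oneRound_subset E _ a (stepR_edge2 r a b hb)⟩
    · exact ⟨fun ha => (ih (stepR r q) h).1 (stepR_mem r q a ha),
             fun hb => (ih (stepR r q) h).2 (stepR_mem r q b hb)⟩

theorem oneRound_sound (boxes : List (List Int)) (E0 : List (List (List Int)))
    (v0 : List Int) :
    ∀ (E : List (List (List Int))) (r : PySem.Set (List Int)),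
      (∀ p ∈ E, ∃ a b, p = [a, b] ∧ EdgeR E0 a b) →
      (∀ x ∈ r, ConnR E0 v0 x) → ∀ x ∈ oneRound E r, ConnR E0 v0 x := by
  intro E
  induction E with
  | nil => intro r _ hr; exact hr
  | cons q E ih =>
    intro r hE hr x hx
    rw [oneRound_cons] at hx
    obtain ⟨a, b, rfl, hedge⟩ := hE q (by simp)
    refine ih (stepR r [a, b]) (fun p hp => hE p (by simp [hp])) ?_ x hx
    intro y hy
    rcases stepR_sub r a b y hy with h | ⟨ha, rfl⟩ | ⟨hb, rfl⟩
    · exact hr y h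
    · exact Relation.ReflTransGen.tail (hr a ha) hedge
    · exact Relation.ReflTransGen.tail (hr b hb) hedge.symm

theorem oneRound_sub_boxes (boxes : List (List Int)) :
    ∀ (E : List (List (List Int))) (r : PySem.Set (List Int)),
      GoodE boxes E → (∀ x ∈ r, x ∈ boxes) → ∀ x ∈ oneRound E r, x ∈ boxes := by
  intro E
  induction E with
  | nil => intro r _ hr; exact hr
  | cons q E ih =>
    intro r hE hr x hx
    rw [oneRound_cons] at hx
    obtain ⟨a, b, rfl, ha, hb⟩ := hE q (by simp)
    refine ih (stepR r [a, b]) (fun p hp => hE p (by simp [hp])) ?_ x hx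
    intro y hy
    rcases stepR_sub r a b y hy with h | ⟨_, rfl⟩ | ⟨_, rfl⟩
    · exact hr y h
    · exact hb
    · exact ha

theorem oneRound_nodup (E : List (List (List Int))) :
    ∀ (r : PySem.Set (List Int)), r.Nodup → (oneRound E r).Nodup := by
  induction E with
  | nil => intro r h; exact h
  | cons q E ih => intro r h; rw [oneRound_cons]; exact ih _ (stepR_nodup r q h)

theorem closed_of_equal (E : List (List (List Int))) (r : PySem.Set (List Int))
    (h : PySem.Set.equal (oneRound E r) r = true) : ClosedR E r := by
  rw [PySem.Set.equal_iff] at h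
  intro p hp a b hab
  subst hab
  exact ⟨fun ha => (h b).mp ((oneRound_edge E r a b hp).1 ha),
         fun hb => (h a).mp ((oneRound_edge E r a b hp).2 hb)⟩

theorem oneRound_grows (E : List (List (List Int))) (r : PySem.Set (List Int))
    (hnd : r.Nodup) (h : ¬ PySem.Set.equal (oneRound E r) r = true) :
    r.length < (oneRound E r).length := by
  have hsub : ∀ x ∈ r, x ∈ oneRound E r := oneRound_subset E r
  have hnd' : (oneRound E r).Nodup := oneRound_nodup E r hnd
  have : ∃ y ∈ oneRound E r, y ∉ r := by
    by_contra hc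
    push_neg at hc
    exact h ((PySem.Set.equal_iff _ _).mpr (fun x => ⟨fun hx => hc x hx, fun hx => hsub x hx⟩))
  obtain ⟨y, hy, hyn⟩ := this
  have e1 := List.toFinset_card_of_nodup hnd
  have e2 := List.toFinset_card_of_nodup hnd'
  have h3 : r.toFinset ⊂ (oneRound E r).toFinset := by
    constructor
    · intro x hx; simp only [List.mem_toFinset] at *; exact hsub x hx
    · intro hsub'
      exact hyn (by simpa using hsub' (by simpa using hy))
  have := Finset.card_lt_card h3
  omega

theorem iterRounds_mem (E : List (List (List Int))) :
    ∀ (n : Nat) (r : PySem.Set (List Int)) (x : List Int), x ∈ r → x ∈ iterRounds E n r := by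
  intro n
  induction n with
  | zero => intro r x hx; exact hx
  | succ n ih =>
    intro r x hx
    show x ∈ (if PySem.Set.equal (oneRound E r) r then r else iterRounds E n (oneRound E r))
    split_ifs
    · exact hx
    · exact ih _ x (oneRound_subset E r x hx)

theorem iterRounds_sound (boxes : List (List Int)) (E : List (List (List Int)))
    (hE : GoodE boxes E) (v0 : List Int) :
    ∀ (n : Nat) (r : PySem.Set (List Int)), (∀ x ∈ r, ConnR E v0 x) →
      ∀ x ∈ iterRounds E n r, ConnR E v0 x := by
  have hshape : ∀ p ∈ E, ∃ a b, p = [a, b] ∧ EdgeR E a b := by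
    intro p hp
    obtain ⟨a, b, rfl, _, _⟩ := hE p hp
    exact ⟨a, b, rfl, Or.inl hp⟩
  intro n
  induction n with
  | zero => intro r hr; exact hr
  | succ n ih =>
    intro r hr x hx
    rw [show iterRounds E (n+1) r =
      (if PySem.Set.equal (oneRound E r) r then r else iterRounds E n (oneRound E r)) from rfl] at hx
    split_ifs at hx
    · exact hr x hx
    · exact ih (oneRound E r) (oneRound_sound boxes E v0 E r hshape hr) x hx

theorem iterRounds_closed (boxes : List (List Int)) (hbnd : boxes.Nodup)
    (E : List (List (List Int))) (hE : GoodE boxes E) :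
    ∀ (n : Nat) (r : PySem.Set (List Int)), r.Nodup → (∀ x ∈ r, x ∈ boxes) →
      boxes.length ≤ n + r.length → ClosedR E (iterRounds E n r) := by
  intro n
  induction n with
  | zero =>
    intro r hnd hsub hlen
    have hall : ∀ x ∈ boxes, x ∈ r := by
      have e1 := List.toFinset_card_of_nodup hnd
      have e2 := List.toFinset_card_of_nodup hbnd
      have h3 : r.toFinset ⊆ boxes.toFinset := by
        intro x hx; simp only [List.mem_toFinset] at *; exact hsub x hx
      have heq : r.toFinset = boxes.toFinset := Finset.eq_of_subset_of_card_le h3 (by omega)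
      intro x hx
      have : x ∈ r.toFinset := heq ▸ (by simpa using hx)
      simpa using this
    intro p hp a b hab
    subst hab
    obtain ⟨a', b', he, ha', hb'⟩ := hE _ hp
    obtain ⟨rfl, rfl⟩ : a = a' ∧ b = b' := by
      constructor <;> injection he with h1 h2 <;> first | exact h1 | injection h2 with h3 _
    exact ⟨fun _ => hall _ hb', fun _ => hall _ ha'⟩
  | succ n ih =>
    intro r hnd hsub hlen
    show ClosedR E (if PySem.Set.equal (oneRound E r) r then r else iterRounds E n (oneRound E r))
    split_ifs with heq
    · exact closed_of_equal E r heq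
    · refine ih (oneRound E r) (oneRound_nodup E r hnd) (oneRound_sub_boxes boxes E r hE hsub) ?_
      have := oneRound_grows E r hnd (by simpa using heq)
      omega

theorem connB_iff (boxes : List (List Int)) (hbnd : boxes.Nodup)
    (v0 : List Int) (rest : List (List Int)) (hb : boxes = v0 :: rest)
    (E : List (List (List Int))) (hE : GoodE boxes E) :
    (connectedB boxes E = true ↔ AllConn v0 boxes E) := by
  subst hb
  have hget : PySem.List.pyGet? (v0 :: rest) 0 = some v0 := by simp [pysem]
  rw [show connectedB (v0 :: rest) E =
      ((v0 :: rest).all (fun v => PySem.Set.contains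
        (iterRounds E (v0 :: rest).length (PySem.Set.ofList [v0])) v)) by
    unfold connectedB; rw [hget]]
  have hof : PySem.Set.ofList [v0] = [v0] := rfl
  set reach := iterRounds E (v0 :: rest).length (PySem.Set.ofList [v0]) with hreach
  rw [List.all_eq_true]
  constructor
  · intro h x hx
    have hmem : x ∈ reach := (PySem.Set.contains_iff _ _).mp (h x hx)
    refine iterRounds_sound (v0 :: rest) E hE v0 _ _ ?_ x hmem
    intro y hy
    rw [hof] at hy
    simp only [List.mem_singleton] at hy
    subst hy
    exact Relation.ReflTransGen.refl
  · intro h x hx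
    have hclosed : ClosedR E reach := by
      refine iterRounds_closed (v0 :: rest) hbnd E hE _ _ ?_ ?_ ?_
      · rw [hof]; exact List.nodup_singleton v0
      · rw [hof]; intro y hy; simp only [List.mem_singleton] at hy; subst hy; simp
      · rw [hof]; simp
    have hv0 : v0 ∈ reach := iterRounds_mem E _ _ v0 (by rw [hof]; simp)
    rw [PySem.Set.contains_iff]
    have hconn := h x hx
    clear hx
    induction hconn with
    | refl => exact hv0
    | tail hcon hstep ih =>
      rcases hstep with hs | hs
      · exact (hclosed _ hs _ _ rfl).1 ih
      · exact (hclosed _ hs _ _ rfl).2 ih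

theorem bsLoop_least (boxes : List (List Int)) (pairs : List (List (List Int)))
    (P : Nat → Bool) (hP : ∀ m, P m = connectedB boxes (pairs.take m))
    (hmono : ∀ i j, i ≤ j → P i = true → P j = true) :
    ∀ (n lo hi : Nat), hi - lo = n → lo ≤ hi → P hi = true → (∀ j < lo, P j = false) →
      P (bsLoop boxes pairs lo hi) = true ∧
      (∀ j < bsLoop boxes pairs lo hi, P j = false) ∧
      lo ≤ bsLoop boxes pairs lo hi ∧ bsLoop boxes pairs lo hi ≤ hi := by
  intro n
  induction n using Nat.strong_induction_on with
  | _ n ih =>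
  intro lo hi hn hle hhi hlo
  rw [bsLoop]
  by_cases hlt : lo < hi
  · rw [if_pos hlt]
    simp only []
    rw [PySem.List.slice_to_natCast pairs ((lo + hi) / 2), ← hP ((lo + hi) / 2)]
    by_cases hc : P ((lo + hi) / 2) = true
    · rw [if_pos hc]
      obtain ⟨h1, h2, h3, h4⟩ :=
        ih ((lo + hi) / 2 - lo) (by omega) lo ((lo + hi) / 2) rfl (by omega) hc hlo
      exact ⟨h1, h2, h3, by omega⟩
    · rw [if_neg hc]
      have hlo' : ∀ j < (lo + hi) / 2 + 1, P j = false := by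
        intro j hj
        by_cases hjlo : j < lo
        · exact hlo j hjlo
        · rcases Bool.eq_false_or_eq_true (P j) with h | h
          · exact absurd (hmono j ((lo + hi) / 2) (by omega) h) hc
          · exact h
      obtain ⟨h1, h2, h3, h4⟩ :=
        ih (hi - ((lo + hi) / 2 + 1)) (by omega) ((lo + hi) / 2 + 1) hi rfl (by omega) hhi hlo'
      exact ⟨h1, h2, by omega, h4⟩
  · rw [if_neg hlt]
    have : lo = hi := by omega
    subst this
    exact ⟨hhi, hlo, le_refl _, le_refl _⟩
theorem pairsSorted_shape (boxes : List (List Int)) :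
    ∀ p ∈ pairsSorted boxes, ∃ a b, p = [a, b] ∧ a ∈ boxes ∧ b ∈ boxes := by
  intro p hp
  rw [pairsSorted, PySem.List.mem_sorted, PySem.List.mem_combinations_iff] at hp
  obtain ⟨hsub, hlen⟩ := hp
  match p, hlen with
  | [a, b], _ =>
    exact ⟨a, b, rfl, hsub.subset (by simp), hsub.subset (by simp)⟩

theorem pairsSorted_nil (boxes : List (List Int)) (h : boxes.length < 2) :
    pairsSorted boxes = [] := by
  rw [pairsSorted, PySem.List.sorted_eq_nil_iff]
  exact PySem.List.combinations_eq_nil_of_length_lt boxes h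

-- ===== VERDICT (by name: the statement is the Claim_ definition above) =====
theorem get_last_junction_spec : Claim_equal_get_last_junction := by
  intro boxes _ hpre
  unfold Spec_get_last_junction
  have hnd : boxes.Nodup := hpre.1
  by_cases hlen2 : boxes.length < 2
  · -- fewer than two boxes: no pairs on either side
    rw [get_last_junction, pairsSorted_nil boxes hlen2]
    rw [get_last_junction_alt, if_pos hlen2]
    rfl
  · obtain ⟨v0, v1, rest, rfl⟩ : ∃ v0 v1 rest, boxes = v0 :: v1 :: rest := by
      rcases boxes with _ | ⟨v0, _ | ⟨v1, rest⟩⟩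
      · simp at hlen2
      · simp at hlen2
      · exact ⟨v0, v1, rest, rfl⟩
    set boxes := v0 :: v1 :: rest with hboxes
    set pairs := pairsSorted boxes with hpairs
    have hshape : ∀ p ∈ pairs, ∃ a b, p = [a, b] ∧ a ∈ boxes ∧ b ∈ boxes :=
      pairsSorted_shape boxes
    have hGood : ∀ m, GoodE boxes (pairs.take m) :=
      fun m p hp => hshape p (List.take_subset m pairs hp)
    have hbiff : ∀ m, (connectedB boxes (pairs.take m) = true ↔ AllConn v0 boxes (pairs.take m)) :=
      fun m => connB_iff boxes hnd v0 (v1 :: rest) rfl _ (hGood m)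
    have hsubtake : ∀ i j : Nat, i ≤ j → ∀ p ∈ pairs.take i, p ∈ pairs.take j := by
      intro i j hij p hp
      have he : pairs.take i = (pairs.take j).take i := by
        rw [List.take_take, Nat.min_eq_left hij]
      rw [he] at hp
      exact List.take_subset i (pairs.take j) hp
    have hmono : ∀ i j : Nat, i ≤ j →
        connectedB boxes (pairs.take i) = true → connectedB boxes (pairs.take j) = true := by
      intro i j hij h
      rw [hbiff] at h ⊢
      exact allconn_mono v0 boxes (hsubtake i j hij) h
    have hF0 : connectedB boxes (pairs.take 0) = false := by
      rcases Bool.eq_false_or_eq_true (connectedB boxes (pairs.take 0)) with h | h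
      · exfalso
        have hall := (hbiff 0).mp h
        have := connR_nil (by simpa using hall v1 (by rw [hboxes]; simp))
        exact (List.nodup_cons.mp hnd).1 (by rw [this]; simp)
      · exact h
    have hinv0 : AInv boxes [] (boxes.map fun b => PySem.Set.ofList [b]) := ainv_init boxes hnd
    have hlen0 : 2 ≤ (boxes.map fun b => PySem.Set.ofList [b]).length := by
      rw [List.length_map]; rw [hboxes]; simp
    have hv0 : v0 ∈ boxes := by rw [hboxes]; simp
    have hAdef : get_last_junction boxes = loopA pairs (boxes.map fun b => PySem.Set.ofList [b]) := rfl
    by_cases hFL : connectedB boxes (pairs.take pairs.length) = true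
    · -- the full pair list connects everything: both sides return the product at the
      -- least connecting prefix
      have hex : ∃ m, connectedB boxes (pairs.take m) = true := ⟨pairs.length, hFL⟩
      set m0 := Nat.find hex with hm0
      have hm0F : connectedB boxes (pairs.take m0) = true := Nat.find_spec hex
      have hm0min : ∀ j, j < m0 → connectedB boxes (pairs.take j) = false := by
        intro j hj
        have := Nat.find_min hex hj
        simpa using this
      have hm0L : m0 ≤ pairs.length := Nat.find_min' hex hFL
      have hm01 : 1 ≤ m0 := by
        rcases Nat.eq_zero_or_pos m0 with h | h
        · exact absurd (h ▸ hm0F) (by rw [hF0]; simp)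
        · exact h
      have hkL : m0 - 1 < pairs.length := by omega
      obtain ⟨a, b, hab, ha, hb⟩ := hshape pairs[m0 - 1] (List.getElem_mem hkL)
      have habq : pairs[m0 - 1]? = some [a, b] := by
        rw [List.getElem?_eq_getElem hkL, hab]
      have hAres : loopA pairs (boxes.map fun b => PySem.Set.ofList [b]) = prodFirsts a b := by
        refine loopA_found boxes v0 hv0 pairs [] _ (m0 - 1) hshape hinv0 hlen0 ?_ ?_ a b habq
        · rw [List.nil_append, show m0 - 1 + 1 = m0 by omega]
          exact (hbiff m0).mp hm0F
        · intro j hj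
          rw [List.nil_append]
          intro hc
          exact absurd ((hbiff j).mpr hc) (by rw [hm0min j (by omega)]; simp)
      have hcB : connectedB boxes pairs = true := by rwa [List.take_length] at hFL
      have hbs := bsLoop_least boxes pairs (fun m => connectedB boxes (pairs.take m))
        (fun m => rfl) hmono (pairs.length - 1) 1 pairs.length rfl (by omega) hFL
        (by intro j hj
            have : j = 0 := by omega
            rw [this]; exact hF0)
      obtain ⟨hbF0, hbmin0, hb1, hbL⟩ := hbs
      have hbF : connectedB boxes (pairs.take (bsLoop boxes pairs 1 pairs.length)) = true := hbF0
      have hbmin : ∀ j, j < bsLoop boxes pairs 1 pairs.length →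
          connectedB boxes (pairs.take j) = false := fun j hj => hbmin0 j hj
      have hbsm0 : bsLoop boxes pairs 1 pairs.length = m0 := by
        by_contra hne'
        rcases Nat.lt_or_ge (bsLoop boxes pairs 1 pairs.length) m0 with h | h
        · exact absurd hbF (by rw [hm0min _ h]; simp)
        · have hlt : m0 < bsLoop boxes pairs 1 pairs.length := by omega
          exact absurd hm0F (by rw [hbmin _ hlt]; simp)
      have hBres : get_last_junction_alt boxes = prodFirsts a b := by
        rw [get_last_junction_alt, if_neg hlen2]
        simp only [← hpairs, hcB, Bool.not_true, Bool.false_eq_true, if_false, hbsm0]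
        have hcast : ((m0 : Int) - 1) = ((m0 - 1 : Nat) : Int) := by
          rw [Nat.cast_sub hm01]; rfl
        rw [hcast, PySem.List.pyGet?_natCast, habq]
        rfl
      rw [hAdef, hAres, hBres]
    · -- never connected (impossible under Pre_, but both sides agree anyway): both none
      have hAres : loopA pairs (boxes.map fun b => PySem.Set.ofList [b]) = none := by
        refine loopA_none boxes v0 hv0 pairs [] _ hshape hinv0 hlen0 ?_
        rw [List.nil_append]
        intro hc
        exact hFL ((hbiff pairs.length).mpr (by rwa [List.take_length]))
      have hcB : connectedB boxes pairs = false := by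
        rcases Bool.eq_false_or_eq_true (connectedB boxes pairs) with h | h
        · exact absurd (by rwa [List.take_length]) hFL
        · exact h
      have hBres : get_last_junction_alt boxes = none := by
        rw [get_last_junction_alt, if_neg hlen2]
        simp only [← hpairs, hcB, Bool.not_false, if_true]
      rw [hAdef, hAres, hBres]
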